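-- pv_equiv track=rewrite | github.com/BFeng14/ActFound | datas/ACNet/ACNet/ACComponents/ACSplitter.py | GetTargetidList
-- ===== SOURCE A (Python) =====
-- def GetTargetidList(dataset):
--     tarid2size = {}
--     tarid2sample = {}
--     for item in dataset:
--         tarid = item['Target']
--         if tarid not in tarid2size.keys():
--             tarid2size.update({tarid: 0})
--             tarid2sample.update({tarid: []})
--         tarid2size[tarid] += 1
--         tarid2sample[tarid].append(item)
--     return tarid2size, tarid2sample
-- ===== SOURCE B (Python) =====
-- def GetTargetidList(dataset):
--     # Pass 1: distinct target ids in order of first occurrence.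
--     order = []
--     for item in dataset:
--         t = item['Target']
--         if t not in order:
--             order.append(t)
--     # Pass 2: one filtering scan of the whole dataset per target id.
--     tarid2sample = {t: [it for it in dataset if it['Target'] == t] for t in order}
--     tarid2size = {t: len(v) for t, v in tarid2sample.items()}
--     return tarid2size, tarid2sample
-- ===== Notes on version B (the rewrite author's own statement) =====
-- stated objective: alternative
-- what changed: Instead of A's single-pass incremental grouping (membership test plus two dict updates and a counter increment per item), B first collects the distinct target ids in first-occurrence order, then builds each group by a separate filtering scan of the whole dataset per id and derives sizes from the group lengths.
import Mathlib
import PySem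

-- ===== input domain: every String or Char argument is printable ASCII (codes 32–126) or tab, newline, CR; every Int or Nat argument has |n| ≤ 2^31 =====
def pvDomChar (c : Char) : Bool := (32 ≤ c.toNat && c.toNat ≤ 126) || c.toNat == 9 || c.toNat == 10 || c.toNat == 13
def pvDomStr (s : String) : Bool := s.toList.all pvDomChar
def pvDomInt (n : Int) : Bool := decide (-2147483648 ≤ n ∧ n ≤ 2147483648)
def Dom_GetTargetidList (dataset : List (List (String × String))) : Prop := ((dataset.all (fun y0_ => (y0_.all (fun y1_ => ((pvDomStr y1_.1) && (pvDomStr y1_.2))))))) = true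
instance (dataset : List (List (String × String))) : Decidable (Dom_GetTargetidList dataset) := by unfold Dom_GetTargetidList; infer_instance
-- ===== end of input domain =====

-- B replaces A's single-pass incremental grouping by two stages: collect the distinct
-- target ids in first-occurrence order, then build each group by filtering the whole
-- dataset per id; sizes are the group lengths.

-- ===== PORT A =====
-- item['Target']: first matching value in the association list; none = KeyError (excluded by Pre_)
def pyGetTarget (item : List (String × String)) : Option String :=
  (item.find? (fun p => p.1 == "Target")).map (·.2)

def GetTargetidList (dataset : List (List (String × String))) : (List (String × Int)) × (List (String × List (List (String × String)))) :=
  let st := dataset.foldl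
    (fun (st : PySem.Dict String Int × PySem.Dict String (List (List (String × String)))) item =>
      match pyGetTarget item with
      | none => st   -- KeyError; unreachable under Pre_
      | some tarid =>
        let st := if st.1.contains tarid then st
                  else (st.1.insert tarid 0, st.2.insert tarid [])
        (st.1.modify tarid 0 (· + 1), st.2.modify tarid [] (· ++ [item])))
    (PySem.Dict.empty, PySem.Dict.empty)
  (st.1.items, st.2.items)

-- ===== PORT B =====
-- it['Target'] == t  (false if the comparison is never reached; an item without the key
-- is a KeyError in Python, excluded by Pre_)
def pvKeyEq (t : String) (it : List (String × String)) : Bool :=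
  match pyGetTarget it with
  | some s => s == t
  | none => false

def GetTargetidList_alt (dataset : List (List (String × String))) : (List (String × Int)) × (List (String × List (List (String × String)))) :=
  let order := dataset.foldl
    (fun (order : List String) item =>
      match pyGetTarget item with
      | none => order   -- KeyError; unreachable under Pre_
      | some t => if order.contains t then order else order ++ [t]) []
  -- dict comprehensions over the duplicate-free `order`: insertion order = `order`
  let sample := order.map (fun t => (t, dataset.filter (fun it => pvKeyEq t it)))
  let size := sample.map (fun p => (p.1, (p.2.length : Int)))
  (size, sample)

-- ===== PRECONDITION & SPEC =====
-- Pre_ excludes exactly the inputs where A raises KeyError: some item has no 'Target' key.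
def Pre_GetTargetidList (dataset : List (List (String × String))) : Prop :=
  (dataset.all (fun item => item.any (fun p => p.1 == "Target"))) = true

instance (dataset : List (List (String × String))) : Decidable (Pre_GetTargetidList dataset) := by
  unfold Pre_GetTargetidList; infer_instance

def pvWitness_GetTargetidList : (List (List (String × String))) :=
  [[("Target", "a"), ("x", "1")], [("Target", "b")], [("Target", "a")]]

def Spec_GetTargetidList (dataset : List (List (String × String))) (out : (List (String × Int)) × (List (String × List (List (String × String))))) : Prop := out = GetTargetidList_alt dataset
instance (dataset : List (List (String × String))) (out : (List (String × Int)) × (List (String × List (List (String × String))))) : Decidable (Spec_GetTargetidList dataset out) := by unfold Spec_GetTargetidList; infer_instance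

-- ===== CLAIM (what is proved, stated in full; the proofs are below) =====
def Claim_equal_GetTargetidList : Prop := ∀ (dataset : List (List (String × String))), Dom_GetTargetidList dataset → Pre_GetTargetidList dataset → Spec_GetTargetidList dataset (GetTargetidList dataset)

-- ===== LEMMAS AND PROOFS =====

-- A's incremental grouping loop, as a proof-side reference point
def pvGroupStep (m : PySem.Dict String (List (List (String × String))))
    (item : List (String × String)) : PySem.Dict String (List (List (String × String))) :=
  match pyGetTarget item with
  | none => m
  | some t => (m.setdefault t []).modify t [] (· ++ [item])

-- the size dict derived from a grouping dict
def pvSz (m : PySem.Dict String (List (List (String × String)))) : PySem.Dict String Int :=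
  ⟨m.items.map (fun p => (p.1, (p.2.length : Int)))⟩

lemma pvSz_contains (m : PySem.Dict String (List (List (String × String)))) (t : String) :
    (pvSz m).contains t = m.contains t := by
  simp only [pvSz, PySem.Dict.contains, List.any_map]
  rfl

lemma pvSz_getD (m : PySem.Dict String (List (List (String × String)))) (t : String) :
    (pvSz m).getD t 0 = ((m.getD t []).length : Int) := by
  simp only [PySem.Dict.getD, PySem.Dict.get?, pvSz, List.find?_map]
  have : List.find? ((fun p => p.1 == t) ∘ (fun p : String × List (List (String × String)) => (p.1, (p.2.length : Int)))) m.items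
      = List.find? (fun p => p.1 == t) m.items := rfl
  rw [this]
  cases h : List.find? (fun p => p.1 == t) m.items <;> simp

-- modify on a dict whose only entry with key t is a freshly appended one
lemma pvModify_append_fresh {ν : Type} (L : List (String × ν)) (t : String) (v dflt : ν)
    (f : ν → ν) (h : ∀ p ∈ L, (p.1 == t) = false) :
    PySem.Dict.modify ⟨L ++ [(t, v)]⟩ t dflt f = ⟨L ++ [(t, f v)]⟩ := by
  have hfind : List.find? (fun p => p.1 == t) L = none := by
    rw [List.find?_eq_none]; intro p hp; simp [h p hp]
  have hget : PySem.Dict.getD (⟨L ++ [(t, v)]⟩ : PySem.Dict String ν) t dflt = v := by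
    simp [PySem.Dict.getD, PySem.Dict.get?, List.find?_append, hfind]
  have hcont : PySem.Dict.contains (⟨L ++ [(t, v)]⟩ : PySem.Dict String ν) t = true := by
    simp [PySem.Dict.contains]
  simp only [PySem.Dict.modify, PySem.Dict.insert, hcont, if_pos, hget]
  congr 1
  rw [List.map_append]
  congr 1
  · calc L.map (fun p => if (p.1 == t) = true then (t, f v) else p) = L.map id := by
          apply List.map_congr_left; intro p hp; simp [h p hp]
        _ = L := List.map_id L
  · simp

-- one loop step of A: A's step on (pvSz m, m) stays in the pvSz relation with pvGroupStep
lemma pvStep (m : PySem.Dict String (List (List (String × String)))) (t : String)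
    (item : List (String × String)) :
    ((if (pvSz m).contains t then (pvSz m, m)
      else ((pvSz m).insert t 0, m.insert t [])).1.modify t 0 (· + 1),
     (if (pvSz m).contains t then (pvSz m, m)
      else ((pvSz m).insert t 0, m.insert t [])).2.modify t [] (· ++ [item]))
    = (pvSz ((m.setdefault t []).modify t [] (· ++ [item])),
       (m.setdefault t []).modify t [] (· ++ [item])) := by
  rw [pvSz_contains]
  by_cases h : m.contains t = true
  · rw [PySem.Dict.setdefault_of_contains m _ h]
    simp only [h, if_pos]
    refine Prod.ext ?_ rfl
    apply PySem.Dict.ext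
    have h1 : (pvSz m).contains t = true := by rw [pvSz_contains]; exact h
    simp only [PySem.Dict.modify, PySem.Dict.insert, h1, h, if_pos, pvSz_getD]
    simp only [pvSz, List.map_map]
    apply List.map_congr_left
    intro p _
    by_cases hp : (p.1 == t) = true <;>
      simp [Function.comp, hp, List.length_append]
  · have h' : m.contains t = false := by simpa using h
    rw [PySem.Dict.setdefault_of_not_contains m _ h']
    simp only [h', Bool.false_eq_true, if_false]
    have hfresh : ∀ p ∈ m.items, (p.1 == t) = false := by
      intro p hp
      by_contra hc
      have : m.contains t = true := by
        simp only [PySem.Dict.contains, List.any_eq_true]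
        exact ⟨p, hp, by simpa using hc⟩
      simp [h'] at this
    have hfreshS : ∀ p ∈ (pvSz m).items, (p.1 == t) = false := by
      intro p hp
      simp only [pvSz, List.mem_map] at hp
      obtain ⟨q, hq, rfl⟩ := hp
      exact hfresh q hq
    have hins : m.insert t [] = (⟨m.items ++ [(t, [])]⟩ : PySem.Dict String (List (List (String × String)))) := by
      simp [PySem.Dict.insert, h']
    have hinsS : (pvSz m).insert t 0 = (⟨(pvSz m).items ++ [(t, 0)]⟩ : PySem.Dict String Int) := by
      simp [PySem.Dict.insert, pvSz_contains, h']
    rw [hins, hinsS, pvModify_append_fresh _ _ _ _ _ hfreshS,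
      pvModify_append_fresh _ _ _ _ _ hfresh]
    refine Prod.ext ?_ rfl
    simp [pvSz]

-- A's whole fold stays in the pvSz relation with the grouping fold
lemma pvFold (l : List (List (String × String)))
    (m : PySem.Dict String (List (List (String × String)))) :
    l.foldl
      (fun (st : PySem.Dict String Int × PySem.Dict String (List (List (String × String)))) item =>
        match pyGetTarget item with
        | none => st
        | some tarid =>
          let st := if st.1.contains tarid then st
                    else (st.1.insert tarid 0, st.2.insert tarid [])
          (st.1.modify tarid 0 (· + 1), st.2.modify tarid [] (· ++ [item])))
      (pvSz m, m)
    = (pvSz (l.foldl pvGroupStep m), l.foldl pvGroupStep m) := by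
  induction l generalizing m with
  | nil => rfl
  | cons item l ih =>
    simp only [List.foldl_cons]
    cases hg : pyGetTarget item with
    | none =>
      simp only [pvGroupStep, hg]
      exact ih m
    | some tarid =>
      simp only [pvGroupStep, hg]
      exact (congrArg (fun s => List.foldl _ s l) (pvStep m tarid item)).trans
        (ih ((m.setdefault tarid []).modify tarid [] (· ++ [item])))

-- the new keys of l (in first-occurrence order) relative to already-seen keys
def pvOrdDiff : List (List (String × String)) → List String → List String
  | [], _ => []
  | item :: l, seen =>
    match pyGetTarget item with
    | none => pvOrdDiff l seen
    | some t => if seen.contains t then pvOrdDiff l seen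
                else t :: pvOrdDiff l (seen ++ [t])

-- the groups of l for the new keys, each collected from its first occurrence onwards
def pvNew : List (List (String × String)) → List String → List (String × List (List (String × String)))
  | [], _ => []
  | item :: l, seen =>
    match pyGetTarget item with
    | none => pvNew l seen
    | some t => if seen.contains t then pvNew l seen
                else (t, item :: l.filter (pvKeyEq t)) :: pvNew l (seen ++ [t])

lemma pvOrdDiff_not_seen (l : List (List (String × String))) (seen : List String)
    (t : String) (ht : t ∈ pvOrdDiff l seen) : seen.contains t = false := by
  induction l generalizing seen with
  | nil => simp [pvOrdDiff] at ht
  | cons item l ih =>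
    simp only [pvOrdDiff] at ht
    cases hg : pyGetTarget item with
    | none => simp only [hg] at ht; exact ih seen ht
    | some s =>
      simp only [hg] at ht
      by_cases hc : seen.contains s = true
      · rw [if_pos hc] at ht; exact ih seen ht
      · rw [if_neg hc] at ht
        rcases List.mem_cons.1 ht with rfl | ht'
        · simpa using hc
        · have := ih (seen ++ [s]) ht'
          simp only [List.contains_append, Bool.or_eq_false_iff] at this
          exact this.1

-- B's order loop computes seen ++ pvOrdDiff
lemma pvOrderFold (l : List (List (String × String))) (seen : List String) :
    l.foldl
      (fun (order : List String) item =>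
        match pyGetTarget item with
        | none => order
        | some t => if order.contains t then order else order ++ [t]) seen
    = seen ++ pvOrdDiff l seen := by
  induction l generalizing seen with
  | nil => simp [pvOrdDiff]
  | cons item l ih =>
    simp only [List.foldl_cons, pvOrdDiff]
    cases hg : pyGetTarget item with
    | none => simpa using ih seen
    | some t =>
      simp only [hg]
      by_cases hc : seen.contains t = true
      · rw [if_pos hc, if_pos hc]; simpa using ih seen
      · rw [if_neg hc, if_neg hc]
        rw [ih (seen ++ [t])]
        simp

-- pvNew is pvOrdDiff paired with whole-list filters
lemma pvNew_eq_map (l : List (List (String × String))) (seen : List String) :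
    pvNew l seen = (pvOrdDiff l seen).map (fun t => (t, l.filter (pvKeyEq t))) := by
  induction l generalizing seen with
  | nil => simp [pvNew, pvOrdDiff]
  | cons item l ih =>
    simp only [pvNew, pvOrdDiff]
    cases hg : pyGetTarget item with
    | none =>
      simp only [hg]
      rw [ih seen]
      apply List.map_congr_left
      intro t _
      have : pvKeyEq t item = false := by simp [pvKeyEq, hg]
      simp [this]
    | some s =>
      simp only [hg]
      by_cases hc : seen.contains s = true
      · rw [if_pos hc, if_pos hc, ih seen]
        apply List.map_congr_left
        intro t ht
        have hts : ¬ (s = t) := by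
          intro h
          have hn := pvOrdDiff_not_seen l seen t ht
          rw [← h] at hn
          simp only [List.contains_iff_mem] at hc
          simp [hc] at hn
        have : pvKeyEq t item = false := by simp [pvKeyEq, hg, hts]
        simp [this]
      · rw [if_neg hc, if_neg hc, List.map_cons]
        congr 1
        · have : pvKeyEq s item = true := by simp [pvKeyEq, hg]
          simp [this]
        · rw [ih (seen ++ [s])]
          apply List.map_congr_left
          intro t ht
          have hns := pvOrdDiff_not_seen l (seen ++ [s]) t ht
          simp only [List.contains_append, Bool.or_eq_false_iff] at hns
          have hts : ¬ (s = t) := by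
            intro h
            have := hns.2; rw [← h] at this; simp at this
          have : pvKeyEq t item = false := by simp [pvKeyEq, hg, hts]
          simp [this]

-- characterization of the incremental grouping fold: existing groups are extended with
-- the matching items of l, new keys are appended with their whole groups
lemma pvGroupFold (l : List (List (String × String)))
    (m : PySem.Dict String (List (List (String × String)))) (hm : m.keys.Nodup) :
    (l.foldl pvGroupStep m).items
    = m.items.map (fun p => (p.1, p.2 ++ l.filter (pvKeyEq p.1))) ++ pvNew l m.keys := by
  induction l generalizing m with
  | nil =>
    simp only [List.foldl_nil, pvNew, List.filter_nil, List.append_nil]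
    conv_lhs => rw [← List.map_id m.items]
    apply List.map_congr_left; intro p _; simp
  | cons item l ih =>
    simp only [List.foldl_cons, pvGroupStep, pvNew]
    cases hg : pyGetTarget item with
    | none =>
      simp only [hg]
      rw [ih m hm]
      congr 1
      apply List.map_congr_left
      intro p _
      have : pvKeyEq p.1 item = false := by simp [pvKeyEq, hg]
      simp [this]
    | some t =>
      simp only [hg]
      have hmemkeys : m.contains t = true ↔ t ∈ m.keys := PySem.Dict.contains_iff_mem_keys m t
      have hkeyseen : m.keys.contains t = m.contains t := by
        by_cases h : m.contains t = true
        · simp [h, hmemkeys.1 h]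
        · have h' : m.contains t = false := by simpa using h
          rw [h']
          by_contra hc
          have : t ∈ m.keys := List.contains_iff_mem.1 (by simpa using hc)
          rw [← hmemkeys] at this; simp [h'] at this
      by_cases h : m.contains t = true
      · -- existing key: setdefault is a no-op, modify replaces the unique entry at t
        rw [PySem.Dict.setdefault_of_contains m _ h]
        rw [hkeyseen, h, if_pos rfl]
        set m' := m.modify t [] (· ++ [item]) with hm'
        have hkeys' : m'.keys = m.keys := by
          simp [hm', PySem.Dict.keys_modify, PySem.Dict.keys_insert_of_contains, h]
        have hitems' : m'.items
            = m.items.map (fun p => if p.1 == t then (t, m.getD t [] ++ [item]) else p) := by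
          rw [hm']
          simp only [PySem.Dict.modify, PySem.Dict.insert, h, if_pos]
        rw [ih m' (hkeys' ▸ hm), hkeys', hitems', List.map_map]
        congr 1
        apply List.map_congr_left
        intro p hp
        by_cases hpt : (p.1 == t) = true
        · have hpt' : p.1 = t := by simpa using hpt
          have hpv : m.getD t [] = p.2 := by
            have := PySem.Dict.getD_of_mem_items (d := m) (k := p.1) (v := p.2)
              (by simpa using hp) hm ([])
            rw [← hpt', this]
          simp only [Function.comp, hpt, if_pos, hpv, hpt']
          have : pvKeyEq t item = true := by simp [pvKeyEq, hg]
          simp [this]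
        · simp only [Function.comp, hpt, Bool.false_eq_true, if_false]
          have hne : ¬ (t = p.1) := by
            intro hh; subst hh; simp at hpt
          have : pvKeyEq p.1 item = false := by simp [pvKeyEq, hg, hne]
          simp [this]
      · -- new key: setdefault appends (t, []), modify makes it (t, [item])
        have h' : m.contains t = false := by simpa using h
        rw [PySem.Dict.setdefault_of_not_contains m _ h']
        rw [hkeyseen, h']
        simp only [Bool.false_eq_true, if_false]
        have hfresh : ∀ p ∈ m.items, (p.1 == t) = false := by
          intro p hp
          by_contra hc
          have : m.contains t = true := by
            simp only [PySem.Dict.contains, List.any_eq_true]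
            exact ⟨p, hp, by simpa using hc⟩
          simp [h'] at this
        have hins : m.insert t [] = (⟨m.items ++ [(t, [])]⟩ : PySem.Dict String (List (List (String × String)))) := by
          simp [PySem.Dict.insert, h']
        have hstep : (m.insert t []).modify t [] (· ++ [item])
            = (⟨m.items ++ [(t, [item])]⟩ : PySem.Dict String (List (List (String × String)))) := by
          rw [hins, pvModify_append_fresh _ _ _ _ _ hfresh]
          rfl
        set m' : PySem.Dict String (List (List (String × String))) := ⟨m.items ++ [(t, [item])]⟩ with hm'
        have hkeys' : m'.keys = m.keys ++ [t] := by
          simp [hm', PySem.Dict.keys]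
        have hnd' : m'.keys.Nodup := by
          rw [hkeys']
          refine List.Nodup.append hm (List.nodup_singleton t) ?_
          intro x hx hx'
          rcases List.mem_singleton.1 hx' with rfl
          have : m.contains x = true := hmemkeys.2 hx
          simp [h'] at this
        rw [hstep, ih m' hnd', hkeys']
        simp only [hm', PySem.Dict.items, List.map_append, List.map_cons, List.map_nil,
          List.append_assoc, List.singleton_append]
        have hhd : pvKeyEq t item = true := by simp [pvKeyEq, hg]
        refine congrArg₂ (· ++ ·) ?_ ?_
        · apply List.map_congr_left
          intro p hp
          have hne : ¬ (t = p.1) := by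
            intro hh
            have := hfresh p hp; rw [← hh] at this; simp at this
          have : pvKeyEq p.1 item = false := by simp [pvKeyEq, hg, hne]
          simp [List.filter_cons, this]
        · simp [List.filter_cons, hhd]

-- ===== VERDICT (by name: the statement is the Claim_ definition above) =====
theorem GetTargetidList_spec : Claim_equal_GetTargetidList := by
  intro dataset _ _
  unfold Spec_GetTargetidList GetTargetidList GetTargetidList_alt
  have h0 : (PySem.Dict.empty : PySem.Dict String Int)
      = pvSz (PySem.Dict.empty : PySem.Dict String (List (List (String × String)))) := rfl
  rw [h0, pvFold]
  have hitems : (dataset.foldl pvGroupStep PySem.Dict.empty).items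
      = pvNew dataset [] := by
    rw [pvGroupFold dataset PySem.Dict.empty (by simp [PySem.Dict.empty, PySem.Dict.keys])]
    rfl
  have hsample : (dataset.foldl pvGroupStep PySem.Dict.empty).items
      = (pvOrdDiff dataset []).map (fun t => (t, dataset.filter (fun it => pvKeyEq t it))) := by
    rw [hitems, pvNew_eq_map]
  rw [pvOrderFold dataset []]
  simp only [List.nil_append]
  refine Prod.ext ?_ ?_
  · show (pvSz _).items = _
    simp only [pvSz, hsample, List.map_map]
  · exact hsample
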